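-- pv_equiv track=rewrite | github.com/robit-man/EGG | pi5/watchdog.py | _select_primary_link
-- ===== SOURCE A (Python) =====
-- from typing import Deque, Dict, List, Optional, Sequence, Tuple
--
-- def _select_primary_link(links: Dict[str, str]) -> Tuple[str, str]:
--     if not links:
--         return "", ""
--
--     preferred_exact = (
--         "lan_llm_dashboard_url",
--         "local_llm_dashboard_url",
--         "tunnel_llm_dashboard_url",
--         "llm_dashboard_url",
--         "lan_dashboard_url",
--         "local_dashboard_url",
--         "tunnel_dashboard_url",
--         "dashboard_url",
--         "lan_list_url",
--         "local_list_url",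
--         "tunnel_list_url",
--         "list_url",
--         "lan_base_url",
--         "local_base_url",
--         "tunnel_base_url",
--     )
--     for key in preferred_exact:
--         value = str(links.get(key) or "").strip()
--         if value:
--             return key, value
--
--     best_key = ""
--     best_url = ""
--     best_rank = (9, 9, 9, 999)
--     for key, value in links.items():
--         url = str(value or "").strip()
--         if not url:
--             continue
--         key_text = str(key or "").lower()
--         if key_text.startswith("lan_"):
--             scope_rank = 0
--         elif key_text.startswith("tunnel_"):
--             scope_rank = 1
--         elif key_text.startswith("local_"):
--             scope_rank = 2
--         else:
--             scope_rank = 3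
--         if "dashboard" in key_text:
--             route_rank = 0
--         elif key_text.endswith("list_url"):
--             route_rank = 1
--         elif key_text.endswith("health_url"):
--             route_rank = 2
--         elif key_text.endswith("_url"):
--             route_rank = 3
--         else:
--             route_rank = 4
--         rank = (scope_rank, route_rank, len(key_text), len(url))
--         if rank < best_rank:
--             best_rank = rank
--             best_key = key
--             best_url = url
--     return best_key, best_url
-- ===== SOURCE B (Python) =====
-- from typing import Dict, Tuple
--
-- _PREFERRED = (
--     "lan_llm_dashboard_url",
--     "local_llm_dashboard_url",
--     "tunnel_llm_dashboard_url",
--     "llm_dashboard_url",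
--     "lan_dashboard_url",
--     "local_dashboard_url",
--     "tunnel_dashboard_url",
--     "dashboard_url",
--     "lan_list_url",
--     "local_list_url",
--     "tunnel_list_url",
--     "list_url",
--     "lan_base_url",
--     "local_base_url",
--     "tunnel_base_url",
-- )
--
-- def _select_primary_link(links: Dict[str, str]) -> Tuple[str, str]:
--     best = None  # (rank, key, url); first-seen wins on equal rank
--     for key, value in links.items():
--         url = str(value or "").strip()
--         if not url:
--             continue
--         if key in _PREFERRED:
--             rank = (0, _PREFERRED.index(key), 0, 0, 0)
--         else:
--             kl = str(key or "").lower()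
--             if kl.startswith("lan_"):
--                 scope = 0
--             elif kl.startswith("tunnel_"):
--                 scope = 1
--             elif kl.startswith("local_"):
--                 scope = 2
--             else:
--                 scope = 3
--             if "dashboard" in kl:
--                 route = 0
--             elif kl.endswith("list_url"):
--                 route = 1
--             elif kl.endswith("health_url"):
--                 route = 2
--             elif kl.endswith("_url"):
--                 route = 3
--             else:
--                 route = 4
--             rank = (1, scope, route, len(kl), len(url))
--         if best is None or rank < best[0]:
--             best = (rank, key, url)
--     return (best[1], best[2]) if best else ("", "")
-- ===== Notes on version B (the rewrite author's own statement) =====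
-- stated objective: alternative
-- what changed: Replaces A's two phases (a probe loop over the 15 preferred keys with dict lookups, then a separate rank-minimising scan with a sentinel rank) by a single stable-min pass over the items under one total 5-component lexicographic rank key (preferred-index tier first, then scope/route/length tier).
import Mathlib
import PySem

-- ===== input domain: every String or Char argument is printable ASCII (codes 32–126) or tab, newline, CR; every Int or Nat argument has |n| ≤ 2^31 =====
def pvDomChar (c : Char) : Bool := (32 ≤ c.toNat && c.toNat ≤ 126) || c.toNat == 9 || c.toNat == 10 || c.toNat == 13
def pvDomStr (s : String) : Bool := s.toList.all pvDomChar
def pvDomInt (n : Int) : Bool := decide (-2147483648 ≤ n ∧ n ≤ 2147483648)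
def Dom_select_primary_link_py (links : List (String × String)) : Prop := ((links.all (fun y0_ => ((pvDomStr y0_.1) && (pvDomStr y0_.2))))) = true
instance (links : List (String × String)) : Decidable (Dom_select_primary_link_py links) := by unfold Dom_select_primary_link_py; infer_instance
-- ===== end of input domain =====

-- B replaces A's two phases (a probe loop over the 15 preferred keys, then a rank-minimising
-- scan) by ONE stable-min pass over the items under a single 5-component lexicographic rank;
-- objective: alternative decomposition (same asymptotic cost).

-- ===== PORT A =====
def pvPreferredExact : List String :=
  ["lan_llm_dashboard_url", "local_llm_dashboard_url", "tunnel_llm_dashboard_url",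
   "llm_dashboard_url", "lan_dashboard_url", "local_dashboard_url", "tunnel_dashboard_url",
   "dashboard_url", "lan_list_url", "local_list_url", "tunnel_list_url", "list_url",
   "lan_base_url", "local_base_url", "tunnel_base_url"]

-- links.get(key) or ""  (dict lookup = first match in the association list)
def pvGet (links : List (String × String)) (k : String) : String :=
  match links.find? (fun p => p.1 == k) with
  | some p => p.2
  | none => ""

-- the 'for key in preferred_exact' loop with its early return
def pvPhase1 (links : List (String × String)) : List String → Option (String × String)
  | [] => none
  | k :: ks =>
      let value := PySem.Str.strip (pvGet links k)
      if value ≠ "" then some (k, value) else pvPhase1 links ks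

-- Python's '<' on the 4-tuple rank
def pvLt4 (a b : Int × Int × Int × Int) : Bool :=
  a.1 < b.1 || (a.1 == b.1 && (a.2.1 < b.2.1 || (a.2.1 == b.2.1 &&
    (a.2.2.1 < b.2.2.1 || (a.2.2.1 == b.2.2.1 && a.2.2.2 < b.2.2.2)))))

-- one iteration of the fallback loop; state = (best_key, best_url, best_rank)
def pvStepA (st : String × String × (Int × Int × Int × Int)) (p : String × String) :
    String × String × (Int × Int × Int × Int) :=
  let url := PySem.Str.strip p.2
  if url = "" then st
  else
    let kt := PySem.Str.lower p.1
    let scope : Int := if PySem.Str.startswith kt "lan_" then 0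
      else if PySem.Str.startswith kt "tunnel_" then 1
      else if PySem.Str.startswith kt "local_" then 2 else 3
    let route : Int := if PySem.Str.isIn "dashboard" kt then 0
      else if PySem.Str.endswith kt "list_url" then 1
      else if PySem.Str.endswith kt "health_url" then 2
      else if PySem.Str.endswith kt "_url" then 3 else 4
    let rank := (scope, route, PySem.Str.len kt, PySem.Str.len url)
    if pvLt4 rank st.2.2 then (p.1, url, rank) else st

def select_primary_link_py (links : List (String × String)) : String × String :=
  if links = [] then ("", "")
  else
    match pvPhase1 links pvPreferredExact with
    | some r => r
    | none =>
      let st := links.foldl pvStepA ("", "", (9, 9, 9, 999))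
      (st.1, st.2.1)

-- ===== PORT B =====
-- Python's '<' on the 5-tuple rank
def pvLt5 (a b : Int × Int × Int × Int × Int) : Bool :=
  a.1 < b.1 || (a.1 == b.1 && (a.2.1 < b.2.1 || (a.2.1 == b.2.1 &&
    (a.2.2.1 < b.2.2.1 || (a.2.2.1 == b.2.2.1 &&
      (a.2.2.2.1 < b.2.2.2.1 || (a.2.2.2.1 == b.2.2.2.1 && a.2.2.2.2 < b.2.2.2.2)))))))

-- the single total-order ranking key of Source B ('key in _PREFERRED' + '.index' = index?)
def pvRank5 (key url : String) : Int × Int × Int × Int × Int :=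
  match PySem.List.index? pvPreferredExact key with
  | some i => (0, (i : Int), 0, 0, 0)
  | none =>
    let kl := PySem.Str.lower key
    let scope : Int := if PySem.Str.startswith kl "lan_" then 0
      else if PySem.Str.startswith kl "tunnel_" then 1
      else if PySem.Str.startswith kl "local_" then 2 else 3
    let route : Int := if PySem.Str.isIn "dashboard" kl then 0
      else if PySem.Str.endswith kl "list_url" then 1
      else if PySem.Str.endswith kl "health_url" then 2
      else if PySem.Str.endswith kl "_url" then 3 else 4
    (1, scope, route, PySem.Str.len kl, PySem.Str.len url)

-- one iteration of Source B's loop; best = None | (rank, key, url), first seen wins on ties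
def pvStepB (best : Option ((Int × Int × Int × Int × Int) × String × String))
    (p : String × String) : Option ((Int × Int × Int × Int × Int) × String × String) :=
  let url := PySem.Str.strip p.2
  if url = "" then best
  else
    let rank := pvRank5 p.1 url
    match best with
    | none => some (rank, p.1, url)
    | some b => if pvLt5 rank b.1 then some (rank, p.1, url) else some b

def select_primary_link_py_alt (links : List (String × String)) : String × String :=
  match links.foldl pvStepB none with
  | some b => (b.2.1, b.2.2)
  | none => ("", "")

-- ===== PRECONDITION & SPEC =====
-- Pre_ excludes association lists with duplicate keys: a Python dict cannot contain them, and
-- on such lists the first-match lookup of links.get versus iteration over every pair is an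
-- accident of the list representation, not a behaviour of the Python programs.
def Pre_select_primary_link_py (links : List (String × String)) : Prop :=
  (links.map Prod.fst).Nodup
instance (links : List (String × String)) : Decidable (Pre_select_primary_link_py links) := by
  unfold Pre_select_primary_link_py; infer_instance

def pvWitness_select_primary_link_py : (List (String × String)) :=
  [("dashboard_url", " http://x "), ("foo", "y")]

def Spec_select_primary_link_py (links : List (String × String)) (out : String × String) : Prop :=
  out = select_primary_link_py_alt links
instance (links : List (String × String)) (out : String × String) :
    Decidable (Spec_select_primary_link_py links out) := by
  unfold Spec_select_primary_link_py; infer_instance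

-- ===== CLAIM (what is proved, stated in full; the proofs are below) =====
def Claim_equal_select_primary_link_py : Prop :=
  ∀ (links : List (String × String)), Dom_select_primary_link_py links →
    Pre_select_primary_link_py links →
    Spec_select_primary_link_py links (select_primary_link_py links)

-- ===== LEMMAS AND PROOFS =====

-- proof-side abbreviation for the fallback rank both programs compute
def pvR4 (key url : String) : Int × Int × Int × Int :=
  let kt := PySem.Str.lower key
  ((if PySem.Str.startswith kt "lan_" then 0
      else if PySem.Str.startswith kt "tunnel_" then 1
      else if PySem.Str.startswith kt "local_" then 2 else 3),
   (if PySem.Str.isIn "dashboard" kt then 0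
      else if PySem.Str.endswith kt "list_url" then 1
      else if PySem.Str.endswith kt "health_url" then 2
      else if PySem.Str.endswith kt "_url" then 3 else 4),
   PySem.Str.len kt, PySem.Str.len url)

lemma pvStepA_eq (st : String × String × (Int × Int × Int × Int)) (p : String × String) :
    pvStepA st p = if PySem.Str.strip p.2 = "" then st
      else if pvLt4 (pvR4 p.1 (PySem.Str.strip p.2)) st.2.2
        then (p.1, PySem.Str.strip p.2, pvR4 p.1 (PySem.Str.strip p.2)) else st := rfl

lemma pvRank5_none {key : String} (url : String)
    (h : PySem.List.index? pvPreferredExact key = none) :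
    pvRank5 key url = (1, pvR4 key url) := by
  unfold pvRank5; rw [h]; rfl

lemma pvRank5_some {key : String} (url : String) {i : Nat}
    (h : PySem.List.index? pvPreferredExact key = some i) :
    pvRank5 key url = (0, (i : Int), 0, 0, 0) := by
  unfold pvRank5; rw [h]

lemma pvR4_fst_lt (key url : String) : (pvR4 key url).1 < 9 := by
  simp only [pvR4]; split_ifs <;> norm_num

lemma pvLt4_init (key url : String) : pvLt4 (pvR4 key url) (9, 9, 9, 999) = true := by
  have := pvR4_fst_lt key url
  simp [pvLt4]; omega

lemma pvLt5_asymm {a b : Int × Int × Int × Int × Int} (h : pvLt5 a b = true) :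
    pvLt5 b a = false := by
  simp only [pvLt5, Bool.or_eq_true, Bool.and_eq_true, beq_iff_eq, decide_eq_true_eq] at h
  simp only [pvLt5, Bool.or_eq_false_iff, Bool.and_eq_false_iff, beq_eq_false_iff_ne, ne_eq,
    decide_eq_false_iff_not]
  omega

lemma pvLt5_one_one (a b : Int × Int × Int × Int) :
    pvLt5 (1, a) (1, b) = pvLt4 a b := by
  simp [pvLt5, pvLt4]

lemma pvLt5_zero_one (i : Int) (b : Int × Int × Int × Int) :
    pvLt5 (0, i, 0, 0, 0) (1, b) = true := by
  simp [pvLt5]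

lemma pvLt5_zero_zero {i j : Nat} (h : i < j) :
    pvLt5 (0, (i : Int), 0, 0, 0) (0, (j : Int), 0, 0, 0) = true := by
  simp [pvLt5]; omega

-- lookup in a duplicate-free association list finds the member itself
lemma pvGet_of_mem {links : List (String × String)} {p : String × String}
    (hnd : (links.map Prod.fst).Nodup) (hp : p ∈ links) : pvGet links p.1 = p.2 := by
  induction links with
  | nil => cases hp
  | cons q rest ih =>
    simp only [List.map_cons, List.nodup_cons] at hnd
    rcases List.mem_cons.mp hp with h | h
    · subst h; simp [pvGet, List.find?]
    · have hne : ¬ (q.1 == p.1) = true := by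
        simp only [beq_iff_eq]
        intro he
        exact hnd.1 (he ▸ List.mem_map_of_mem h)
      have := ih hnd.2 h
      simpa [pvGet, List.find?, hne] using this

-- phase 1 of A, characterised
lemma pvPhase1_none {links : List (String × String)} :
    ∀ {ks : List String}, pvPhase1 links ks = none →
      ∀ k ∈ ks, PySem.Str.strip (pvGet links k) = "" := by
  intro ks
  induction ks with
  | nil => intro _ k hk; cases hk
  | cons k0 rest ih =>
    intro h k hk
    simp only [pvPhase1] at h
    by_cases hv : PySem.Str.strip (pvGet links k0) = ""
    · rcases List.mem_cons.mp hk with rfl | hk'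
      · exact hv
      · exact ih (by simpa [hv] using h) k hk'
    · simp [hv] at h

lemma pvPhase1_some {links : List (String × String)} {k : String} {v : String} :
    ∀ {ks : List String}, pvPhase1 links ks = some (k, v) →
      ∃ pre suf, ks = pre ++ k :: suf ∧
        (∀ k' ∈ pre, PySem.Str.strip (pvGet links k') = "") ∧
        v = PySem.Str.strip (pvGet links k) ∧ v ≠ "" := by
  intro ks
  induction ks with
  | nil => intro h; simp [pvPhase1] at h
  | cons k0 rest ih =>
    intro h
    simp only [pvPhase1] at h
    by_cases hv : PySem.Str.strip (pvGet links k0) = ""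
    · rcases ih (by simpa [hv] using h) with ⟨pre, suf, h1, h2, h3, h4⟩
      exact ⟨k0 :: pre, suf, by simp [h1], by
        intro k' hk'
        rcases List.mem_cons.mp hk' with rfl | hk''
        · exact hv
        · exact h2 k' hk'', h3, h4⟩
    · simp only [hv, ne_eq, not_false_eq_true, if_pos, Option.some.injEq, Prod.mk.injEq] at h
      exact ⟨[], rest, by simp [h.1], by simp, by rw [← h.1, ← h.2], by rw [← h.2]; exact hv⟩

-- B's fold: the result is the start state or a candidate from the list
lemma pvFoldB_mem : ∀ (l : List (String × String))
    (st : Option ((Int × Int × Int × Int × Int) × String × String)),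
    l.foldl pvStepB st = st ∨ ∃ p ∈ l, PySem.Str.strip p.2 ≠ "" ∧
      l.foldl pvStepB st = some (pvRank5 p.1 (PySem.Str.strip p.2), p.1, PySem.Str.strip p.2) := by
  intro l
  induction l with
  | nil => intro st; left; rfl
  | cons p rest ih =>
    intro st
    simp only [List.foldl_cons]
    by_cases hu : PySem.Str.strip p.2 = ""
    · have hst : pvStepB st p = st := by simp [pvStepB, hu]
      rw [hst]
      rcases ih st with h | ⟨q, hq, hq2, hq3⟩
      · exact Or.inl h
      · exact Or.inr ⟨q, List.mem_cons_of_mem _ hq, hq2, hq3⟩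
    · have hcand : pvStepB st p = st ∨
          pvStepB st p = some (pvRank5 p.1 (PySem.Str.strip p.2), p.1, PySem.Str.strip p.2) := by
        simp only [pvStepB, hu]
        cases st with
        | none => exact Or.inr rfl
        | some b =>
          by_cases hlt : pvLt5 (pvRank5 p.1 (PySem.Str.strip p.2)) b.1 = true
          · simp [hlt]
          · simp [hlt]
      rcases hcand with h | h
      · rw [h]
        rcases ih st with h' | ⟨q, hq, hq2, hq3⟩
        · exact Or.inl h'
        · exact Or.inr ⟨q, List.mem_cons_of_mem _ hq, hq2, hq3⟩
      · rw [h]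
        rcases ih (some (pvRank5 p.1 (PySem.Str.strip p.2), p.1, PySem.Str.strip p.2)) with
          h' | ⟨q, hq, hq2, hq3⟩
        · exact Or.inr ⟨p, List.mem_cons_self .., hu, h'⟩
        · exact Or.inr ⟨q, List.mem_cons_of_mem _ hq, hq2, hq3⟩

-- B's fold keeps a state no later candidate strictly beats
lemma pvFoldB_keep : ∀ (l : List (String × String))
    (b : (Int × Int × Int × Int × Int) × String × String),
    (∀ p ∈ l, PySem.Str.strip p.2 ≠ "" →
      pvLt5 (pvRank5 p.1 (PySem.Str.strip p.2)) b.1 = false) →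
    l.foldl pvStepB (some b) = some b := by
  intro l
  induction l with
  | nil => intro b _; rfl
  | cons p rest ih =>
    intro b hb
    simp only [List.foldl_cons]
    by_cases hu : PySem.Str.strip p.2 = ""
    · rw [show pvStepB (some b) p = some b by simp [pvStepB, hu]]
      exact ih b (fun q hq => hb q (List.mem_cons_of_mem _ hq))
    · have hlt := hb p (List.mem_cons_self ..) hu
      rw [show pvStepB (some b) p = some b by simp [pvStepB, hu, hlt]]
      exact ih b (fun q hq => hb q (List.mem_cons_of_mem _ hq))

-- B's fold returns the unique strict minimum
lemma pvFoldB_strict_min (as bs : List (String × String)) (q : String × String)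
    (hq : PySem.Str.strip q.2 ≠ "")
    (hmin : ∀ p ∈ as ++ bs, PySem.Str.strip p.2 ≠ "" →
      pvLt5 (pvRank5 q.1 (PySem.Str.strip q.2)) (pvRank5 p.1 (PySem.Str.strip p.2)) = true) :
    (as ++ q :: bs).foldl pvStepB none =
      some (pvRank5 q.1 (PySem.Str.strip q.2), q.1, PySem.Str.strip q.2) := by
  rw [List.foldl_append, List.foldl_cons]
  have hstate : pvStepB (as.foldl pvStepB none) q =
      some (pvRank5 q.1 (PySem.Str.strip q.2), q.1, PySem.Str.strip q.2) := by
    rcases pvFoldB_mem as none with h | ⟨p, hp, hp2, hp3⟩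
    · rw [h]; simp [pvStepB, hq]
    · rw [hp3]
      have := hmin p (List.mem_append_left _ hp) hp2
      simp [pvStepB, hq, this]
  rw [hstate]
  exact pvFoldB_keep bs _ (fun p hp hp2 => by
    exact pvLt5_asymm (hmin p (List.mem_append_right _ hp) hp2))

-- the two folds track each other once no admissible entry is a preferred key
lemma pvFold_AB : ∀ (l : List (String × String)),
    (∀ p ∈ l, PySem.Str.strip p.2 ≠ "" → PySem.List.index? pvPreferredExact p.1 = none) →
    ∀ (k u : String) (r4 : Int × Int × Int × Int),
      l.foldl pvStepB (some ((1, r4), k, u)) =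
        some ((1, (l.foldl pvStepA (k, u, r4)).2.2),
              (l.foldl pvStepA (k, u, r4)).1, (l.foldl pvStepA (k, u, r4)).2.1) := by
  intro l
  induction l with
  | nil => intro _ k u r4; rfl
  | cons p rest ih =>
    intro hl k u r4
    simp only [List.foldl_cons]
    by_cases hu : PySem.Str.strip p.2 = ""
    · rw [show pvStepB (some ((1, r4), k, u)) p = some ((1, r4), k, u) by simp [pvStepB, hu],
        pvStepA_eq, if_pos hu]
      exact ih (fun q hq => hl q (List.mem_cons_of_mem _ hq)) _ _ _
    · have hidx := hl p (List.mem_cons_self ..) hu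
      have hr5 := pvRank5_none (key := p.1) (PySem.Str.strip p.2) hidx
      rw [pvStepA_eq, if_neg hu]
      by_cases hlt : pvLt4 (pvR4 p.1 (PySem.Str.strip p.2)) r4 = true
      · rw [show pvStepB (some ((1, r4), k, u)) p =
            some ((1, pvR4 p.1 (PySem.Str.strip p.2)), p.1, PySem.Str.strip p.2) by
          simp [pvStepB, hu, hr5, pvLt5_one_one, hlt]]
        rw [if_pos hlt]
        exact ih (fun q hq => hl q (List.mem_cons_of_mem _ hq)) _ _ _
      · rw [show pvStepB (some ((1, r4), k, u)) p = some ((1, r4), k, u) by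
          simp [pvStepB, hu, hr5, pvLt5_one_one, hlt]]
        rw [if_neg hlt]
        exact ih (fun q hq => hl q (List.mem_cons_of_mem _ hq)) _ _ _

lemma pvFold_AB0 : ∀ (l : List (String × String)),
    (∀ p ∈ l, PySem.Str.strip p.2 ≠ "" → PySem.List.index? pvPreferredExact p.1 = none) →
    (l.foldl pvStepB none = none ∧
       l.foldl pvStepA ("", "", (9, 9, 9, 999)) = ("", "", (9, 9, 9, 999))) ∨
    (l.foldl pvStepB none =
      some ((1, (l.foldl pvStepA ("", "", (9, 9, 9, 999))).2.2),
            (l.foldl pvStepA ("", "", (9, 9, 9, 999))).1,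
            (l.foldl pvStepA ("", "", (9, 9, 9, 999))).2.1)) := by
  intro l
  induction l with
  | nil => intro _; exact Or.inl ⟨rfl, rfl⟩
  | cons p rest ih =>
    intro hl
    simp only [List.foldl_cons]
    by_cases hu : PySem.Str.strip p.2 = ""
    · rw [show pvStepB none p = none by simp [pvStepB, hu], pvStepA_eq, if_pos hu]
      exact ih (fun q hq => hl q (List.mem_cons_of_mem _ hq))
    · have hidx := hl p (List.mem_cons_self ..) hu
      have hr5 := pvRank5_none (key := p.1) (PySem.Str.strip p.2) hidx
      rw [show pvStepB none p =
          some ((1, pvR4 p.1 (PySem.Str.strip p.2)), p.1, PySem.Str.strip p.2) by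
        simp [pvStepB, hu, hr5],
        pvStepA_eq, if_neg hu, if_pos (pvLt4_init p.1 (PySem.Str.strip p.2))]
      exact Or.inr (pvFold_AB rest (fun q hq => hl q (List.mem_cons_of_mem _ hq)) _ _ _)

lemma pvPreferred_nodup : pvPreferredExact.Nodup := by decide

-- ===== VERDICT (by name: the statement is the Claim_ definition above) =====
theorem select_primary_link_py_spec : Claim_equal_select_primary_link_py := by
  intro links _ hpre
  unfold Spec_select_primary_link_py
  by_cases hnil : links = []
  · subst hnil; rfl
  · cases hps : pvPhase1 links pvPreferredExact with
    | some r =>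
      obtain ⟨k, v⟩ := r
      obtain ⟨pre, suf, hdec, hpreb, hv, hvne⟩ := pvPhase1_some hps
      have hgne : links.find? (fun p => p.1 == k) ≠ none := by
        intro h
        apply hvne
        rw [hv]
        unfold pvGet
        rw [h]
        rfl
      obtain ⟨e, hfe⟩ := Option.ne_none_iff_exists'.mp hgne
      obtain ⟨hek, as, bs, hlinks, has⟩ := List.find?_eq_some_iff_append.mp hfe
      have hek' : e.1 = k := by simpa using hek
      have hge : pvGet links k = e.2 := by unfold pvGet; rw [hfe]
      have hv' : v = PySem.Str.strip e.2 := by rw [hv, hge]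
      have hknp : k ∉ pre := by
        have hnd := pvPreferred_nodup
        rw [hdec, List.nodup_append] at hnd
        intro hk
        exact hnd.2.2 k hk k (by simp) rfl
      have hidx : PySem.List.index? pvPreferredExact k = some pre.length :=
        (PySem.List.index?_eq_some_iff _ _ _).mpr ⟨pre, suf, hdec, rfl, hknp⟩
      have hmin : ∀ p ∈ as ++ bs, PySem.Str.strip p.2 ≠ "" →
          pvLt5 (pvRank5 e.1 (PySem.Str.strip e.2)) (pvRank5 p.1 (PySem.Str.strip p.2)) = true := by
        intro p hp hok
        have hpl : p ∈ links := by
          rw [hlinks]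
          rcases List.mem_append.mp hp with h | h
          · exact List.mem_append_left _ h
          · exact List.mem_append_right _ (List.mem_cons_of_mem _ h)
        rw [hek', pvRank5_some _ hidx]
        cases hip : PySem.List.index? pvPreferredExact p.1 with
        | none => rw [pvRank5_none _ hip]; exact pvLt5_zero_one _ _
        | some j =>
          have hgp : pvGet links p.1 = p.2 := pvGet_of_mem hpre hpl
          have hnp : p.1 ∉ pre := by
            intro hm
            apply hok
            rw [← hgp]
            exact hpreb p.1 hm
          have hpk : p.1 ≠ k := by
            rcases List.mem_append.mp hp with h | h
            · have := has p h
              simpa using this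
            · intro he
              have hnd := hpre
              unfold Pre_select_primary_link_py at hnd
              rw [hlinks] at hnd
              simp only [List.map_append, List.nodup_append, List.map_cons,
                List.nodup_cons] at hnd
              exact hnd.2.1.1 (hek' ▸ he ▸ List.mem_map_of_mem h)
          have hip0 := hip
          rw [hdec] at hip
          obtain ⟨hjlt, hgj, -⟩ := PySem.List.getElem_of_index?_eq_some hip
          have hjgt : pre.length < j := by
            rcases Nat.lt_trichotomy j pre.length with hlt | heq | hgt
            · exfalso
              apply hnp
              rw [List.getElem_append_left hlt] at hgj
              exact hgj ▸ List.getElem_mem _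
            · exfalso
              apply hpk
              subst heq
              rw [List.getElem_append_right (Nat.le_refl _)] at hgj
              simpa using hgj.symm
            · exact hgt
          rw [pvRank5_some _ hip0]
          exact pvLt5_zero_zero hjgt
      have hfold := pvFoldB_strict_min as bs e (by rw [← hv']; exact hvne) hmin
      rw [← hlinks] at hfold
      simp only [select_primary_link_py, select_primary_link_py_alt, if_neg hnil, hps, hfold,
        hek', ← hv']
    | none =>
      have hblank := pvPhase1_none hps
      have hkey : ∀ p ∈ links, PySem.Str.strip p.2 ≠ "" →
          PySem.List.index? pvPreferredExact p.1 = none := by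
        intro p hp hok
        cases hip : PySem.List.index? pvPreferredExact p.1 with
        | none => rfl
        | some j =>
          exfalso
          have hmem : p.1 ∈ pvPreferredExact :=
            (PySem.List.index?_isSome_iff _ _).mp (by rw [hip]; rfl)
          have := hblank p.1 hmem
          rw [pvGet_of_mem hpre hp] at this
          exact hok this
      rcases pvFold_AB0 links hkey with ⟨hB, hA⟩ | hB
      · simp only [select_primary_link_py, select_primary_link_py_alt, if_neg hnil, hps, hA, hB]
      · simp only [select_primary_link_py, select_primary_link_py_alt, if_neg hnil, hps, hB]
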